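-- pv_equiv track=rewrite | github.com/ZPP-MURMURAS/ZPP_Murmuras | src/bert_pipeline/bert_pipeline.py | coupon_to_json_concat
-- ===== SOURCE A (Python) =====
-- from typing import List, Dict
--
-- NER_ENTITY_GROUP = "entity_group"
--
-- NER_TEXT = "word"
--
-- TAG_PRODUCT_NAME = "PRODUCT-NAME"
--
-- TAG_DISCOUNT_TEXT = "DISCOUNT-TEXT"
--
-- TAG_VALIDITY_TEXT = "VALIDITY-TEXT"
--
-- TAG_ACTIVATION_TEXT = "ACTIVATION-TEXT"
--
-- COUPON_PRODUCT_NAME = "product_name"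
--
-- COUPON_DISCOUNT_TEXT = "discount_text"
--
-- COUPON_VALID_UNTIL = "valid_until"
--
-- COUPON_ACTIVATION_TEXT = "activation_text"
--
-- def coupon_to_json_concat(model_coupon: List[Dict[str, any]]) -> Dict[str, str]:
--     """Converts a coupon tagged by the model to a JSON object. All entities of each type are concatenated."""
--     coupon = {COUPON_PRODUCT_NAME: "",
--               COUPON_DISCOUNT_TEXT: "",
--               COUPON_VALID_UNTIL: "",
--               COUPON_ACTIVATION_TEXT: ""}
--
--     for entity in model_coupon:
--         if entity[NER_ENTITY_GROUP] == TAG_PRODUCT_NAME: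
--             coupon[COUPON_PRODUCT_NAME] += entity[NER_TEXT] + " "
--         elif entity[NER_ENTITY_GROUP] == TAG_DISCOUNT_TEXT:
--             coupon[COUPON_DISCOUNT_TEXT] += entity[NER_TEXT] + " "
--         elif entity[NER_ENTITY_GROUP] == TAG_VALIDITY_TEXT:
--             coupon[COUPON_VALID_UNTIL] += entity[NER_TEXT] + " "
--         elif entity[NER_ENTITY_GROUP] == TAG_ACTIVATION_TEXT:
--             coupon[COUPON_ACTIVATION_TEXT] += entity[NER_TEXT] + " "
--
--     for key in coupon.keys():
--         coupon[key] = coupon[key].strip()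
--
--     return coupon
-- ===== SOURCE B (Python) =====
-- from typing import List, Dict
--
-- NER_ENTITY_GROUP = "entity_group"
-- NER_TEXT = "word"
-- TAG_PRODUCT_NAME = "PRODUCT-NAME"
-- TAG_DISCOUNT_TEXT = "DISCOUNT-TEXT"
-- TAG_VALIDITY_TEXT = "VALIDITY-TEXT"
-- TAG_ACTIVATION_TEXT = "ACTIVATION-TEXT"
-- COUPON_PRODUCT_NAME = "product_name"
-- COUPON_DISCOUNT_TEXT = "discount_text"
-- COUPON_VALID_UNTIL = "valid_until"
-- COUPON_ACTIVATION_TEXT = "activation_text"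
--
--
-- def _collect(model_coupon, tag):
--     """One independent pass: join the words of every entity carrying this tag."""
--     return " ".join(
--         e[NER_TEXT] for e in model_coupon if e[NER_ENTITY_GROUP] == tag
--     ).strip()
--
--
-- def coupon_to_json_concat(model_coupon: List[Dict[str, any]]) -> Dict[str, str]:
--     """Converts a coupon tagged by the model to a JSON object. All entities of each type are concatenated."""
--     return {COUPON_PRODUCT_NAME: _collect(model_coupon, TAG_PRODUCT_NAME),
--             COUPON_DISCOUNT_TEXT: _collect(model_coupon, TAG_DISCOUNT_TEXT),
--             COUPON_VALID_UNTIL: _collect(model_coupon, TAG_VALIDITY_TEXT),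
--             COUPON_ACTIVATION_TEXT: _collect(model_coupon, TAG_ACTIVATION_TEXT)}
-- ===== Notes on version B (the rewrite author's own statement) =====
-- stated objective: alternative
-- what changed: Instead of one pass mutating a 4-field dict with string += and then stripping every key, B builds the result dict in one expression from four independent staged passes, each a filter-then-' '.join over model_coupon for one tag.
import Mathlib
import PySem

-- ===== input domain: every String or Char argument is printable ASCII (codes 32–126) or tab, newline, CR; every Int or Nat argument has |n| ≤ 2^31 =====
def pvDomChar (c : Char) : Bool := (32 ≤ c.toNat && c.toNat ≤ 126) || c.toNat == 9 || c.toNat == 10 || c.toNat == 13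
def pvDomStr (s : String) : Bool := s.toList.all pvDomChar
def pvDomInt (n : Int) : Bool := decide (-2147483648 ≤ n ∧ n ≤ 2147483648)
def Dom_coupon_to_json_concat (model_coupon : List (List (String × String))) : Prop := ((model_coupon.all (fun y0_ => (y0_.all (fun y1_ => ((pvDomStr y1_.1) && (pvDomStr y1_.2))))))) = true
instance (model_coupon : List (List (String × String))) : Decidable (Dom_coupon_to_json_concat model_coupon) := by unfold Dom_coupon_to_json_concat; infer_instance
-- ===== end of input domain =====

-- B replaces A's single pass mutating a 4-field dict with `+=` plus a final strip loop by four
-- independent staged passes, each a filter-then-' '.join over the input for one tag.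

-- ===== PORT A =====
-- A's loop body: `coupon[field] += entity["word"] + " "`.  entity[...] is ported as Dict.getD with
-- default "" — exact under Pre_, which requires exactly the keys whose absence makes Python raise KeyError.
def pvStepA (d : PySem.Dict String String) (entity : List (String × String)) : PySem.Dict String String :=
  let ed := PySem.Dict.mk entity
  if ed.getD "entity_group" "" == "PRODUCT-NAME" then
    d.modify "product_name" "" (fun s => s ++ ed.getD "word" "" ++ " ")
  else if ed.getD "entity_group" "" == "DISCOUNT-TEXT" then
    d.modify "discount_text" "" (fun s => s ++ ed.getD "word" "" ++ " ")
  else if ed.getD "entity_group" "" == "VALIDITY-TEXT" then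
    d.modify "valid_until" "" (fun s => s ++ ed.getD "word" "" ++ " ")
  else if ed.getD "entity_group" "" == "ACTIVATION-TEXT" then
    d.modify "activation_text" "" (fun s => s ++ ed.getD "word" "" ++ " ")
  else d

def coupon_to_json_concat (model_coupon : List (List (String × String))) : List (String × String) :=
  let coupon : PySem.Dict String String :=
    PySem.Dict.mk [("product_name", ""), ("discount_text", ""), ("valid_until", ""), ("activation_text", "")]
  let coupon := model_coupon.foldl pvStepA coupon
  let coupon := coupon.keys.foldl (fun d k => d.insert k (PySem.Str.strip (d.getD k ""))) coupon
  coupon.items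

-- ===== PORT B =====
-- the entity_group / word lookups (getD "" is exact under Pre_, as in port A)
def pvEG (e : List (String × String)) : String := (PySem.Dict.mk e).getD "entity_group" ""
def pvW (e : List (String × String)) : String := (PySem.Dict.mk e).getD "word" ""

-- Source B's _collect: one filter-then-join pass for one tag
def pvCollect (mc : List (List (String × String))) (tag : String) : String :=
  PySem.Str.strip (PySem.Str.join " " ((mc.filter (fun e => pvEG e == tag)).map pvW))

def coupon_to_json_concat_alt (model_coupon : List (List (String × String))) : List (String × String) :=
  [("product_name", pvCollect model_coupon "PRODUCT-NAME"),
   ("discount_text", pvCollect model_coupon "DISCOUNT-TEXT"),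
   ("valid_until", pvCollect model_coupon "VALIDITY-TEXT"),
   ("activation_text", pvCollect model_coupon "ACTIVATION-TEXT")]

-- ===== PRECONDITION & SPEC =====
-- Pre_ excludes exactly the inputs where the Python A raises KeyError: an entity without the
-- "entity_group" key, or a tagged entity without the "word" key (Python B raises there too).
def Pre_coupon_to_json_concat (model_coupon : List (List (String × String))) : Prop :=
  ∀ e ∈ model_coupon, (PySem.Dict.mk e).contains "entity_group" = true ∧
    ((PySem.Dict.mk e).getD "entity_group" "" ∈
        (["PRODUCT-NAME", "DISCOUNT-TEXT", "VALIDITY-TEXT", "ACTIVATION-TEXT"] : List String) →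
      (PySem.Dict.mk e).contains "word" = true)
instance (model_coupon : List (List (String × String))) : Decidable (Pre_coupon_to_json_concat model_coupon) := by
  unfold Pre_coupon_to_json_concat; infer_instance

def pvWitness_coupon_to_json_concat : (List (List (String × String))) :=
  [[("entity_group", "PRODUCT-NAME"), ("word", "Milk")], [("entity_group", "O")]]

def Spec_coupon_to_json_concat (model_coupon : List (List (String × String))) (out : List (String × String)) : Prop := out = coupon_to_json_concat_alt model_coupon
instance (model_coupon : List (List (String × String))) (out : List (String × String)) : Decidable (Spec_coupon_to_json_concat model_coupon out) := by unfold Spec_coupon_to_json_concat; infer_instance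

-- ===== CLAIM (what is proved, stated in full; the proofs are below) =====
def Claim_equal_coupon_to_json_concat : Prop := ∀ (model_coupon : List (List (String × String))), Dom_coupon_to_json_concat model_coupon → Pre_coupon_to_json_concat model_coupon → Spec_coupon_to_json_concat model_coupon (coupon_to_json_concat model_coupon)

-- ===== LEMMAS AND PROOFS =====

-- the per-tag word list both versions produce
def pvWords (mc : List (List (String × String))) (t : String) : List String :=
  (mc.filter (fun e => pvEG e == t)).map pvW
def pvMkA (s1 s2 s3 s4 : String) : PySem.Dict String String :=
  PySem.Dict.mk [("product_name",s1),("discount_text",s2),("valid_until",s3),("activation_text",s4)]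

lemma pvStepA_eq (s1 s2 s3 s4 : String) (e : List (String × String)) :
    pvStepA (pvMkA s1 s2 s3 s4) e =
      if pvEG e = "PRODUCT-NAME" then pvMkA (s1 ++ pvW e ++ " ") s2 s3 s4
      else if pvEG e = "DISCOUNT-TEXT" then pvMkA s1 (s2 ++ pvW e ++ " ") s3 s4
      else if pvEG e = "VALIDITY-TEXT" then pvMkA s1 s2 (s3 ++ pvW e ++ " ") s4
      else if pvEG e = "ACTIVATION-TEXT" then pvMkA s1 s2 s3 (s4 ++ pvW e ++ " ")
      else pvMkA s1 s2 s3 s4 := by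
  unfold pvStepA pvEG pvW pvMkA
  split_ifs with h1 h2 h3 h4 <;> simp_all <;> rfl

lemma pvAloop (mc : List (List (String × String))) : ∀ s1 s2 s3 s4 : String,
    mc.foldl pvStepA (pvMkA s1 s2 s3 s4)
    = pvMkA ((pvWords mc "PRODUCT-NAME").foldl (fun a w => a ++ w ++ " ") s1)
            ((pvWords mc "DISCOUNT-TEXT").foldl (fun a w => a ++ w ++ " ") s2)
            ((pvWords mc "VALIDITY-TEXT").foldl (fun a w => a ++ w ++ " ") s3)
            ((pvWords mc "ACTIVATION-TEXT").foldl (fun a w => a ++ w ++ " ") s4) := by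
  induction mc with
  | nil => intro s1 s2 s3 s4; simp [pvWords]
  | cons e mc ih =>
    intro s1 s2 s3 s4
    rw [List.foldl_cons, pvStepA_eq]
    by_cases h1 : pvEG e = "PRODUCT-NAME" <;> by_cases h2 : pvEG e = "DISCOUNT-TEXT" <;>
      by_cases h3 : pvEG e = "VALIDITY-TEXT" <;> by_cases h4 : pvEG e = "ACTIVATION-TEXT" <;>
      simp [pvWords, h1, h2, h3, h4, ih] at *

-- A's final `for key in coupon.keys(): coupon[key] = coupon[key].strip()` on the 4-key dict
lemma pvStripLoop (x1 x2 x3 x4 : String) :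
    (pvMkA x1 x2 x3 x4).keys.foldl (fun d k => d.insert k (PySem.Str.strip (d.getD k ""))) (pvMkA x1 x2 x3 x4)
      = pvMkA (PySem.Str.strip x1) (PySem.Str.strip x2) (PySem.Str.strip x3) (PySem.Str.strip x4) := rfl

-- the string fact behind the representation change: strip of Σ(w + " ") = strip of " ".join(ws)
lemma pvCat_toList (ws : List String) : ∀ s : String,
    (ws.foldl (fun a w => a ++ w ++ " ") s).toList
      = s.toList ++ ws.flatMap (fun w => w.toList ++ [' ']) := by
  induction ws with
  | nil => intro s; simp
  | cons w ws ih => intro s; simp [ih, String.toList_append]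

lemma pvFlat_inter (ws : List (List Char)) (h : ws ≠ []) :
    ws.flatMap (fun w => w ++ [' ']) = List.intercalate [' '] ws ++ [' '] := by
  induction ws with
  | nil => simp at h
  | cons w ws ih =>
    cases ws with
    | nil => simp [List.intercalate]
    | cons y t =>
      rw [show List.intercalate [' '] (w :: y :: t) = w ++ [' '] ++ List.intercalate [' '] (y :: t) from by
        simp [List.intercalate, List.intersperse]]
      simp only [List.flatMap_cons] at *
      rw [ih (by simp)]
      simp

lemma pvStrip_space (l : List Char) : PySem.Chars.strip (l ++ [' ']) = PySem.Chars.strip l := by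
  unfold PySem.Chars.strip PySem.Chars.lstrip PySem.Chars.rstrip
  rw [List.dropWhile_append]
  by_cases h : List.dropWhile PySem.Chars.isspace l = []
  · simp [h, List.dropWhile, PySem.Chars.isspace]
  · simp [List.isEmpty_iff, h, List.reverse_append, PySem.Chars.isspace]

lemma pvStripCat (ws : List String) :
    PySem.Str.strip (ws.foldl (fun a w => a ++ w ++ " ") "") = PySem.Str.strip (PySem.Str.join " " ws) := by
  cases ws with
  | nil => rfl
  | cons w t =>
    unfold PySem.Str.strip PySem.Str.join
    congr 1
    rw [show (String.ofList (PySem.Chars.join " ".toList (List.map String.toList (w :: t)))).toList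
          = PySem.Chars.join [' '] (List.map String.toList (w :: t)) from by simp]
    rw [pvCat_toList]
    rw [show ((w :: t).flatMap (fun x => x.toList ++ [' ']))
          = (List.map String.toList (w :: t)).flatMap (fun x => x ++ [' ']) from by simp [List.flatMap_map]]
    rw [pvFlat_inter _ (by simp)]
    simp [PySem.Chars.join, pvStrip_space]

-- ===== VERDICT (by name: the statement is the Claim_ definition above) =====
theorem coupon_to_json_concat_spec : Claim_equal_coupon_to_json_concat := by
  intro mc _ _
  unfold Spec_coupon_to_json_concat
  show ((mc.foldl pvStepA (pvMkA "" "" "" "")).keys.foldl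
          (fun d k => d.insert k (PySem.Str.strip (d.getD k ""))) (mc.foldl pvStepA (pvMkA "" "" "" ""))).items
      = coupon_to_json_concat_alt mc
  rw [pvAloop, pvStripLoop]
  simp [pvMkA, coupon_to_json_concat_alt, pvCollect, pvWords, pvStripCat]
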